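-- pv_equiv track=rewrite | github.com/Brucelimingluo/Portfolio | Python/hog.py | swine_align
-- ===== SOURCE A (Python) =====
-- def swine_align(player_score, opponent_score):
--     """Return whether the player gets an extra turn due to Swine Align.
--
--     player_score:   The total score of the current player.
--     opponent_score: The total score of the other player.
--
--     >>> swine_align(30, 45)  # The GCD is 15.
--     True
--     >>> swine_align(35, 45)  # The GCD is 5.
--     False
--     """
--
--     def gcd(player_score, opponent_score):
--         while opponent_score:
--             player_score, opponent_score = opponent_score, player_score % opponent_score
--         return player_score
--
--     if gcd(player_score, opponent_score) < 10 or player_score == 0 or opponent_score == 0: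
--         return False
--     return True
-- ===== SOURCE B (Python) =====
-- def swine_align(player_score, opponent_score):
--     """Extra turn iff the two scores are both nonzero and share a common
--     divisor of at least 10 (binary/Stein gcd on absolute values)."""
--     if player_score == 0 or opponent_score == 0:
--         return False
--     a, b = abs(player_score), abs(opponent_score)
--     shift = 0
--     while a % 2 == 0 and b % 2 == 0:
--         a //= 2
--         b //= 2
--         shift += 1
--     while a % 2 == 0:
--         a //= 2
--     while b != 0:
--         while b % 2 == 0:
--             b //= 2
--         if a > b:
--             a, b = b, a
--         b -= a
--     return (a << shift) >= 10
-- ===== Notes on version B (the rewrite author's own statement) =====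
-- stated objective: alternative
-- what changed: Replaces the Euclidean while-loop with floor-mod (whose result inherits the divisor's sign) by a binary (Stein) gcd on absolute values: strip common factors of 2, keep the operands odd, and subtract instead of taking remainders.
-- intended difference: When opponent_score < 0, player_score != 0 and the scores share a common divisor >= 10, A's floor-mod gcd comes out negative so A returns False, while B uses the nonnegative gcd of absolute values and returns True, which is the intended 'GCD at least 10' answer. — e.g. on swine_align(30, -45): A returns false, B returns true
import Mathlib
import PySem

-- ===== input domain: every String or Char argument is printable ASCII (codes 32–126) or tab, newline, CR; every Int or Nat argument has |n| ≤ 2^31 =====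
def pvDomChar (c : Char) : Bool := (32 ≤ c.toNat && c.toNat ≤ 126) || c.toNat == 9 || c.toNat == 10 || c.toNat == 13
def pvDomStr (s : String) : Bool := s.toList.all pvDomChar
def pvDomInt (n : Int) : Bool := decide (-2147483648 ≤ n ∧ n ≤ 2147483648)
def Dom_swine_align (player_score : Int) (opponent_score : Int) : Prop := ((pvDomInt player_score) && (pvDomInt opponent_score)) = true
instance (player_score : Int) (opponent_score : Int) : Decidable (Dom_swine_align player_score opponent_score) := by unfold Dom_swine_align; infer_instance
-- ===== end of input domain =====

-- B replaces A's Euclidean floor-mod while-loop gcd by a binary (Stein) gcd on absolute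
-- values; objective: alternative algorithm. On opponent_score < 0 with a shared divisor
-- ≥ 10 the two differ (see D_swine_align below).

-- ===== PORT A =====
-- termination measure for Python's floor-mod Euclid (cited by the port's decreasing_by)
theorem pyMod_natAbs_lt (a b : Int) (hb : b ≠ 0) : (PySem.Int.mod a b).natAbs < b.natAbs := by
  rcases lt_trichotomy b 0 with h | h | h
  · have hb' := PySem.Int.mod_neg_bounds a h
    omega
  · exact absurd h hb
  · have h1 := PySem.Int.mod_nonneg a h
    have h2 := PySem.Int.mod_lt a h
    omega

-- A's inner helper: while opponent_score: player_score, opponent_score = opponent_score, player_score % opponent_score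
def pvGcdWhile (a b : Int) : Int :=
  if h : b ≠ 0 then pvGcdWhile b (PySem.Int.mod a b) else a
termination_by b.natAbs
decreasing_by exact pyMod_natAbs_lt a b h

def swine_align (player_score : Int) (opponent_score : Int) : Bool :=
  if pvGcdWhile player_score opponent_score < 10 ∨ player_score = 0 ∨ opponent_score = 0 then
    false
  else
    true

-- ===== PORT B =====
-- while x % 2 == 0: x //= 2   (the 'x ≠ 0' conjunct is a totality guard only: B never
-- reaches this loop with x = 0, where the Python loop would not terminate either)
def pvOddify (x : Nat) : Nat :=
  if x % 2 = 0 ∧ x ≠ 0 then pvOddify (x / 2) else x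
termination_by x
decreasing_by exact Nat.div_lt_self (by omega) (by omega)

-- cited by pvSteinLoop's decreasing_by
theorem pvOddify_le : ∀ x : Nat, pvOddify x ≤ x := by
  intro x
  fun_induction pvOddify x with
  | case1 x h ih => exact le_trans ih (Nat.div_le_self _ _)
  | case2 x h => exact le_rfl

-- while a % 2 == 0 and b % 2 == 0: a //= 2; b //= 2; shift += 1
def pvHalve (a b shift : Nat) : Nat × Nat × Nat :=
  if a % 2 = 0 ∧ b % 2 = 0 ∧ a ≠ 0 then pvHalve (a / 2) (b / 2) (shift + 1) else (a, b, shift)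
termination_by a
decreasing_by exact Nat.div_lt_self (by omega) (by omega)

-- while b != 0: (strip 2s from b); if a > b: a, b = b, a; b -= a
-- (the 'a = 0' branch is a totality guard only: B always calls with odd a ≠ 0)
def pvSteinLoop (a b : Nat) : Nat :=
  if hb : b = 0 then a
  else
    let b' := pvOddify b
    if a > b' then pvSteinLoop b' (a - b')
    else if a = 0 then b'
    else pvSteinLoop a (b' - a)
termination_by a + b
decreasing_by
  · have : pvOddify b ≤ b := pvOddify_le b
    omega
  · have : pvOddify b ≤ b := pvOddify_le b
    omega

def swine_align_alt (player_score : Int) (opponent_score : Int) : Bool :=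
  if player_score = 0 ∨ opponent_score = 0 then false
  else
    let r := pvHalve player_score.natAbs opponent_score.natAbs 0
    let a := pvOddify r.1
    let g := pvSteinLoop a r.2.1
    decide (10 ≤ g <<< r.2.2)

-- ===== PRECONDITION & SPEC =====
-- When opponent_score < 0, player_score ≠ 0 and the scores share a common divisor ≥ 10,
-- A's floor-mod gcd is negative so A returns False, while B returns True via the
-- nonnegative gcd of absolute values — the intended 'GCD at least 10' answer.
def D_swine_align (player_score : Int) (opponent_score : Int) : Prop :=
  opponent_score < 0 ∧ player_score ≠ 0 ∧ 10 ≤ Int.gcd player_score opponent_score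
instance (player_score : Int) (opponent_score : Int) : Decidable (D_swine_align player_score opponent_score) := by unfold D_swine_align; infer_instance

def Spec_swine_align (player_score : Int) (opponent_score : Int) (out : Bool) : Prop := ¬ D_swine_align player_score opponent_score → out = swine_align_alt player_score opponent_score
instance (player_score : Int) (opponent_score : Int) (out : Bool) : Decidable (Spec_swine_align player_score opponent_score out) := by unfold Spec_swine_align; infer_instance

def pvDiffWitness_swine_align : Int × Int := (30, -45)
def pvDiffWitnessOut_swine_align : Bool × Bool := (false, true)

-- ===== CLAIM (what is proved, stated in full; the proofs are below) =====
def Claim_unchanged_swine_align : Prop := ∀ (player_score : Int) (opponent_score : Int), Dom_swine_align player_score opponent_score → Spec_swine_align player_score opponent_score (swine_align player_score opponent_score)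
def Claim_changed_swine_align : Prop := Dom_swine_align (pvDiffWitness_swine_align.1) (pvDiffWitness_swine_align.2) ∧ D_swine_align (pvDiffWitness_swine_align.1) (pvDiffWitness_swine_align.2) ∧ swine_align (pvDiffWitness_swine_align.1) (pvDiffWitness_swine_align.2) = pvDiffWitnessOut_swine_align.1 ∧ swine_align_alt (pvDiffWitness_swine_align.1) (pvDiffWitness_swine_align.2) = pvDiffWitnessOut_swine_align.2 ∧ pvDiffWitnessOut_swine_align.1 ≠ pvDiffWitnessOut_swine_align.2
def Claim_exact_swine_align : Prop := ∀ (player_score : Int) (opponent_score : Int), Dom_swine_align player_score opponent_score → D_swine_align player_score opponent_score → swine_align player_score opponent_score ≠ swine_align_alt player_score opponent_score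

-- ===== LEMMAS AND PROOFS =====

-- ---- A side: the floor-mod Euclid returns sign(b) * gcd ----
theorem pvMod_sub (a b : Int) : PySem.Int.mod a b = a - PySem.Int.floordiv a b * b := by
  have := PySem.Int.floordiv_mul_add_mod a b
  omega

theorem gcd_mod_step (a b : Int) : Int.gcd b (PySem.Int.mod a b) = Int.gcd a b := by
  rw [pvMod_sub, Int.gcd_sub_mul_right_right, Int.gcd_comm]

theorem pvGcdWhile_aux : ∀ (n : Nat) (a b : Int), b ≠ 0 → b.natAbs ≤ n →
    pvGcdWhile a b = b.sign * Int.gcd a b := by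
  intro n
  induction n with
  | zero => intro a b hb hle; omega
  | succ n ih =>
    intro a b hb hle
    rw [pvGcdWhile, dif_pos hb]
    by_cases hm : PySem.Int.mod a b = 0
    · rw [pvGcdWhile, dif_neg (not_not_intro hm)]
      have hdvd : b ∣ a := (PySem.Int.mod_eq_zero_iff_dvd a b).mp hm
      rw [Int.gcd_eq_natAbs_right_iff_dvd.mpr hdvd]
      exact (Int.sign_mul_natAbs b).symm
    · have hlt := pyMod_natAbs_lt a b hb
      rw [ih b (PySem.Int.mod a b) hm (by omega), gcd_mod_step]
      congr 1
      rcases lt_trichotomy b 0 with h | h | h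
      · have h1 := PySem.Int.mod_neg_bounds a h
        rw [Int.sign_eq_neg_one_of_neg (by omega), Int.sign_eq_neg_one_of_neg h]
      · exact absurd h hb
      · have h1 := PySem.Int.mod_nonneg a h
        rw [Int.sign_eq_one_of_pos (by omega), Int.sign_eq_one_of_pos h]

theorem pvGcdWhile_eq (a b : Int) (hb : b ≠ 0) : pvGcdWhile a b = b.sign * Int.gcd a b :=
  pvGcdWhile_aux b.natAbs a b hb le_rfl

-- ---- B side: Stein's algorithm computes Nat.gcd of the absolute values ----
theorem pvOddify_odd (x : Nat) (hx : x ≠ 0) : pvOddify x % 2 = 1 := by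
  fun_induction pvOddify x with
  | case1 x h ih => exact ih (by omega)
  | case2 x h =>
    simp only [not_and, ne_eq, Decidable.not_not] at h
    omega

theorem pvOddify_ne_zero (x : Nat) (hx : x ≠ 0) : pvOddify x ≠ 0 := by
  have := pvOddify_odd x hx
  omega

theorem pvOddify_eq_of_odd (x : Nat) (hx : x % 2 = 1) : pvOddify x = x := by
  rw [pvOddify]
  simp [hx]

theorem gcd_oddify_right (a x : Nat) (ha : a % 2 = 1) :
    Nat.gcd a (pvOddify x) = Nat.gcd a x := by
  fun_induction pvOddify x with
  | case1 x h ih =>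
    rw [ih]
    have hcop : Nat.Coprime 2 a :=
      (Nat.Prime.coprime_iff_not_dvd Nat.prime_two).mpr (by omega)
    have hx2 : x = 2 * (x / 2) := by omega
    calc Nat.gcd a (x / 2) = Nat.gcd a (2 * (x / 2)) :=
          (Nat.Coprime.gcd_mul_left_cancel_right (x / 2) hcop).symm
      _ = Nat.gcd a x := by rw [← hx2]
  | case2 x h => rfl

theorem pvSteinLoop_gcd : ∀ (n a b : Nat), a % 2 = 1 → a + b ≤ n →
    pvSteinLoop a b = Nat.gcd a b := by
  intro n
  induction n with
  | zero => intro a b ha hle; omega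
  | succ n ih =>
    intro a b ha hle
    rw [pvSteinLoop]
    by_cases hb : b = 0
    · simp [hb]
    · simp only [hb, dite_false]
      have hb' := pvOddify_odd b hb
      have hble := pvOddify_le b
      have hbne := pvOddify_ne_zero b hb
      have hgb : Nat.gcd a (pvOddify b) = Nat.gcd a b := gcd_oddify_right a b ha
      by_cases hgt : a > pvOddify b
      · simp only [hgt, if_true]
        rw [ih (pvOddify b) (a - pvOddify b) hb' (by omega)]
        rw [Nat.gcd_sub_self_right (by omega), Nat.gcd_comm, hgb]
      · have ha0 : ¬ a = 0 := by omega
        simp only [hgt, if_false, ha0]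
        rw [ih a (pvOddify b - a) ha (by omega)]
        rw [Nat.gcd_sub_self_right (by omega), hgb]

theorem pvHalve_gcd : ∀ (a b s : Nat),
    Nat.gcd (pvHalve a b s).1 (pvHalve a b s).2.1 * 2 ^ (pvHalve a b s).2.2
      = Nat.gcd a b * 2 ^ s := by
  intro a b s
  fun_induction pvHalve a b s with
  | case1 a b s h ih =>
    obtain ⟨ha, hb, ha0⟩ := h
    rw [ih]
    have h2 : Nat.gcd a b = 2 * Nat.gcd (a / 2) (b / 2) := by
      have : a = 2 * (a / 2) := by omega
      have hb2 : b = 2 * (b / 2) := by omega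
      conv_lhs => rw [this, hb2]
      exact Nat.gcd_mul_left 2 (a / 2) (b / 2)
    rw [h2, pow_succ]
    ring
  | case2 a b s h => rfl

theorem pvHalve_a_ne (a b s : Nat) (ha : a ≠ 0) : (pvHalve a b s).1 ≠ 0 := by
  fun_induction pvHalve a b s with
  | case1 a b s h ih => exact ih (by omega)
  | case2 a b s h => exact ha

theorem pvHalve_stop (a b s : Nat) (ha : a ≠ 0) :
    (pvHalve a b s).1 % 2 = 1 ∨ (pvHalve a b s).2.1 % 2 = 1 := by
  fun_induction pvHalve a b s with
  | case1 a b s h ih => exact ih (by omega)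
  | case2 a b s h =>
    dsimp only
    by_cases h2 : a % 2 = 0
    · by_cases h3 : b % 2 = 0
      · exact absurd ⟨h2, h3, ha⟩ h
      · right; omega
    · left; omega

-- B's gcd pipeline equals Nat.gcd of the absolute values
theorem pvStein_total (a b : Nat) (ha : a ≠ 0) :
    pvSteinLoop (pvOddify (pvHalve a b 0).1) (pvHalve a b 0).2.1 <<< (pvHalve a b 0).2.2
      = Nat.gcd a b := by
  set r := pvHalve a b 0 with hr
  have ha1 : r.1 ≠ 0 := pvHalve_a_ne a b 0 ha
  have hodd : pvOddify r.1 % 2 = 1 := pvOddify_odd r.1 ha1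
  have hstein : pvSteinLoop (pvOddify r.1) r.2.1 = Nat.gcd (pvOddify r.1) r.2.1 :=
    pvSteinLoop_gcd (pvOddify r.1 + r.2.1) _ _ hodd le_rfl
  have hg : Nat.gcd (pvOddify r.1) r.2.1 = Nat.gcd r.1 r.2.1 := by
    rcases pvHalve_stop a b 0 ha with h1 | h1
    · rw [pvOddify_eq_of_odd r.1 h1]
    · rw [Nat.gcd_comm, gcd_oddify_right r.2.1 r.1 h1, Nat.gcd_comm]
  have hhal := pvHalve_gcd a b 0
  rw [← hr] at hhal
  rw [Nat.shiftLeft_eq, hstein, hg]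
  simpa using hhal

-- B's port, away from the zero guard, decides 10 ≤ gcd of the absolute values
theorem alt_eq (p q : Int) (hp : p ≠ 0) (hq : q ≠ 0) :
    swine_align_alt p q = decide (10 ≤ Int.gcd p q) := by
  unfold swine_align_alt
  rw [if_neg (by rintro (h | h); exacts [hp h, hq h])]
  show decide (10 ≤ pvSteinLoop (pvOddify (pvHalve p.natAbs q.natAbs 0).1)
      (pvHalve p.natAbs q.natAbs 0).2.1 <<< (pvHalve p.natAbs q.natAbs 0).2.2) = _
  rw [pvStein_total p.natAbs q.natAbs (by omega)]
  rfl

-- A's gcd helper is negative whenever its second argument is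
theorem pvGcdWhile_neg (p q : Int) (hq : q < 0) : pvGcdWhile p q < 10 := by
  rw [pvGcdWhile_eq p q (by omega), Int.sign_eq_neg_one_of_neg hq]
  have : (0:Int) ≤ (Int.gcd p q : Int) := Int.natCast_nonneg _
  omega

-- ===== VERDICT (by name: the statements are the Claim_ definitions above) =====
theorem swine_align_spec : Claim_unchanged_swine_align := by
  intro p q _ hD
  by_cases h0 : p = 0 ∨ q = 0
  · unfold swine_align swine_align_alt
    rw [if_pos h0, if_pos (by tauto)]
  · rcases not_or.mp h0 with ⟨hp, hq⟩
    unfold swine_align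
    rw [alt_eq p q hp hq]
    rcases lt_trichotomy q 0 with hqneg | hq0 | hqpos
    · -- q < 0 and ¬ D_ : the gcd is < 10, both sides are false
      have hglt : Int.gcd p q < 10 := by
        by_contra hge
        exact hD ⟨hqneg, hp, by omega⟩
      rw [if_pos (Or.inl (pvGcdWhile_neg p q hqneg))]
      exact (decide_eq_false (by omega)).symm
    · exact absurd hq0 hq
    · -- q > 0 : both sides decide 10 ≤ gcd
      rw [pvGcdWhile_eq p q hq, Int.sign_eq_one_of_pos hqpos, one_mul]
      by_cases hge : 10 ≤ Int.gcd p q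
      · have hc : ¬ ((Int.gcd p q : Int) < 10 ∨ p = 0 ∨ q = 0) := by
          rintro (h | h | h)
          · have : (10:Int) ≤ (Int.gcd p q : Int) := by exact_mod_cast hge
            omega
          · exact hp h
          · exact hq h
        rw [if_neg hc]
        exact (decide_eq_true hge).symm
      · have hc : (Int.gcd p q : Int) < 10 ∨ p = 0 ∨ q = 0 := by
          left; exact_mod_cast Nat.lt_of_not_le hge
        rw [if_pos hc]
        exact (decide_eq_false hge).symm

theorem swine_align_changed : Claim_changed_swine_align := by
  unfold Claim_changed_swine_align
  refine ⟨by decide, by decide, ?_, ?_, by decide⟩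
  · show swine_align 30 (-45) = false
    unfold swine_align
    rw [pvGcdWhile_eq 30 (-45) (by norm_num)]
    decide
  · show swine_align_alt 30 (-45) = true
    rw [alt_eq 30 (-45) (by norm_num) (by norm_num)]
    decide

theorem swine_align_tight : Claim_exact_swine_align := by
  intro p q _ hD
  obtain ⟨hqneg, hp, hge⟩ := hD
  have hq : q ≠ 0 := by omega
  unfold swine_align
  rw [alt_eq p q hp hq]
  rw [if_pos (Or.inl (pvGcdWhile_neg p q hqneg))]
  intro h
  have := (decide_eq_true hge)
  rw [← h] at this
  cases this
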